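-- pv_equiv track=rewrite | github.com/aszymik/genome-assembler | DBG.py | _find_convergence_point
-- ===== SOURCE A (Python) =====
-- def _find_convergence_point(paths):
--     """Find the first node that all paths re-converge to."""
--     if not paths:
--         return None
--
--     # Use sets to track nodes in each path
--     sets = [set(path) for path in paths]
--
--     # Find common nodes among all paths
--     common_nodes = set.intersection(*sets)
--     if not common_nodes:
--         return None
--
--     # Return the first common node in any path as the convergence point
--     for node in paths[0]:
--         if node in common_nodes:
--             return node
--     return None
-- ===== SOURCE B (Python) =====
-- def _find_convergence_point(paths):
--     """Find the first node that all paths re-converge to."""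
--     if not paths:
--         return None
--     for node in paths[0]:
--         if all(node in path for path in paths[1:]):
--             return node
--     return None
-- ===== Notes on version B (the rewrite author's own statement) =====
-- stated objective: simpler
-- what changed: Dropped the per-path set construction and the full set intersection; B scans paths[0] and returns the first node that is a member (plain list membership) of every other path.
import Mathlib
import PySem

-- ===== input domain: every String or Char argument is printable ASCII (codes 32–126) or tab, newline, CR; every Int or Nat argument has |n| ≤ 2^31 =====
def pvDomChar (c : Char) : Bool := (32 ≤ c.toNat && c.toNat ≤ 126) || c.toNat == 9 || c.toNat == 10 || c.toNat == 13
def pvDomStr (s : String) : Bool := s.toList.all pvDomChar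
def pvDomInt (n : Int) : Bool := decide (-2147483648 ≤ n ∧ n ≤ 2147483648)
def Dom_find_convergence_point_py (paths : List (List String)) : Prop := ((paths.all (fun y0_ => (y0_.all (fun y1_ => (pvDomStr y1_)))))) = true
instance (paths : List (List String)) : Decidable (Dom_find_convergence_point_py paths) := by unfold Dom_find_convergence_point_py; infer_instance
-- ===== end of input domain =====

-- B drops A's per-path set construction and set intersection: it scans paths[0] and returns the
-- first node contained (plain list membership) in every other path; objective: simpler.


-- ===== PORT A =====
-- loop: `for node in paths[0]: if node in common_nodes: return node` then `return None`
def pyFirstCommon (l : List String) (common : PySem.Set String) : Option String :=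
  match l with
  | [] => none
  | x :: xs => if PySem.Set.contains common x then some x else pyFirstCommon xs common

def find_convergence_point_py (paths : List (List String)) : Option String :=
  match paths with
  | [] => none
  | p0 :: rest =>
    -- sets = [set(path) for path in paths]; common_nodes = set.intersection(*sets)
    let common := (rest.map PySem.Set.ofList).foldl PySem.Set.inter (PySem.Set.ofList p0)
    if common.isEmpty then none
    else pyFirstCommon p0 common

-- ===== PORT B =====
def find_convergence_point_py_alt (paths : List (List String)) : Option String :=
  match paths with
  | [] => none
  | p0 :: rest => p0.find? (fun node => rest.all (fun path => path.contains node))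

-- ===== PRECONDITION & SPEC =====
def Spec_find_convergence_point_py (paths : List (List String)) (out : Option String) : Prop := out = find_convergence_point_py_alt paths
instance (paths : List (List String)) (out : Option String) : Decidable (Spec_find_convergence_point_py paths out) := by unfold Spec_find_convergence_point_py; infer_instance

-- ===== CLAIM (what is proved, stated in full; the proofs are below) =====
def Claim_equal_find_convergence_point_py : Prop := ∀ (paths : List (List String)), Dom_find_convergence_point_py paths → Spec_find_convergence_point_py paths (find_convergence_point_py paths)

-- ===== LEMMAS AND PROOFS =====
-- membership in the folded intersection: x ∈ common ↔ x ∈ s and x in every path of rest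
theorem mem_foldl_inter (rest : List (List String)) (s : PySem.Set String) (x : String) :
    x ∈ (rest.map PySem.Set.ofList).foldl PySem.Set.inter s ↔
      x ∈ s ∧ ∀ p ∈ rest, x ∈ p := by
  induction rest generalizing s with
  | nil => simp
  | cons p ps ih =>
    simp only [List.map_cons, List.foldl_cons, ih, PySem.Set.mem_inter, PySem.Set.mem_ofList,
      List.mem_cons]
    constructor
    · rintro ⟨⟨h1, h2⟩, h3⟩
      exact ⟨h1, fun q hq => hq.elim (fun e => e ▸ h2) (h3 q)⟩
    · rintro ⟨h1, h2⟩
      exact ⟨⟨h1, h2 p (Or.inl rfl)⟩, fun q hq => h2 q (Or.inr hq)⟩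

-- A's scan of paths[0] against the intersection set = B's scan with list membership
theorem firstCommon_eq_find? (l : List String) (rest : List (List String)) (p0 : List String)
    (hsub : ∀ x ∈ l, x ∈ p0) :
    pyFirstCommon l ((rest.map PySem.Set.ofList).foldl PySem.Set.inter (PySem.Set.ofList p0)) =
      l.find? (fun node => rest.all (fun path => path.contains node)) := by
  induction l with
  | nil => rfl
  | cons x xs ih =>
    have hx : x ∈ p0 := hsub x List.mem_cons_self
    have htail := ih (fun y hy => hsub y (List.mem_cons_of_mem _ hy))
    have hiff : (PySem.Set.contains
        ((rest.map PySem.Set.ofList).foldl PySem.Set.inter (PySem.Set.ofList p0)) x = true) ↔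
        ((rest.all fun path => path.contains x) = true) := by
      rw [PySem.Set.contains_iff, mem_foldl_inter, List.all_eq_true, PySem.Set.mem_ofList]
      constructor
      · rintro ⟨-, h⟩ q hq
        simpa using h q hq
      · intro h
        exact ⟨hx, fun q hq => by simpa using h q hq⟩
    cases hb : (rest.all fun path => path.contains x) with
    | true =>
      have hc : PySem.Set.contains
          ((rest.map PySem.Set.ofList).foldl PySem.Set.inter (PySem.Set.ofList p0)) x = true :=
        hiff.mpr hb
      rw [List.find?_cons_of_pos (p := fun node => rest.all fun path => path.contains node) hb]
      simp only [pyFirstCommon, hc, if_true]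
    | false =>
      have hc : PySem.Set.contains
          ((rest.map PySem.Set.ofList).foldl PySem.Set.inter (PySem.Set.ofList p0)) x = false := by
        rw [Bool.eq_false_iff]
        intro h
        rw [hiff.mp h] at hb
        cases hb
      rw [List.find?_cons_of_neg (p := fun node => rest.all fun path => path.contains node) (by simpa [List.all_eq_false] using hb)]
      simp only [pyFirstCommon, hc, Bool.false_eq_true, if_false]
      exact htail

-- when the intersection is empty, B's scan also finds nothing
theorem find?_none_of_empty_common (p0 : List String) (rest : List (List String))
    (hemp : ((rest.map PySem.Set.ofList).foldl PySem.Set.inter (PySem.Set.ofList p0)).isEmpty = true) :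
    p0.find? (fun node => rest.all (fun path => path.contains node)) = none := by
  rw [List.find?_eq_none]
  intro x hx hall
  have hmem : x ∈ (rest.map PySem.Set.ofList).foldl PySem.Set.inter (PySem.Set.ofList p0) := by
    refine (mem_foldl_inter rest _ x).mpr ⟨(PySem.Set.mem_ofList p0 x).mpr hx, ?_⟩
    intro p hp
    simpa using (List.all_eq_true).1 hall p hp
  rw [List.isEmpty_iff] at hemp
  rw [hemp] at hmem
  cases hmem

-- ===== VERDICT (by name: the statement is the Claim_ definition above) =====
theorem find_convergence_point_py_spec : Claim_equal_find_convergence_point_py := by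
  intro paths _
  unfold Spec_find_convergence_point_py find_convergence_point_py find_convergence_point_py_alt
  match paths with
  | [] => rfl
  | p0 :: rest =>
    simp only
    split
    · next hemp => exact (find?_none_of_empty_common p0 rest hemp).symm
    · exact firstCommon_eq_find? p0 rest p0 (fun x hx => hx)
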